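-- pv_equiv track=rewrite | github.com/NortonFire007/PythonCourse | homework1/var12/main.py | remove_rows_and_columns
-- ===== SOURCE A (Python) =====
-- def remove_rows_and_columns(matrix, value):
--     rows_to_delete = []
--     columns_to_delete = []
--
--     for i in range(len(matrix)):
--         for j in range(len(matrix[i])):
--             if matrix[i][j] == value:
--                 rows_to_delete.append(i)
--                 columns_to_delete.append(j)
--
--     new_matrix = [
--         [matrix[i][j] for j in range(len(matrix[i])) if j not in columns_to_delete]
--         for i in range(len(matrix))
--         if i not in rows_to_delete
--     ]
--
--     return new_matrix
-- ===== SOURCE B (Python) =====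
-- def remove_rows_and_columns(matrix, value):
--     width = 0
--     for row in matrix:
--         if len(row) > width:
--             width = len(row)
--     result = [list(row) for row in matrix if value not in row]
--     for j in range(width - 1, -1, -1):
--         if any(j < len(row) and row[j] == value for row in matrix):
--             for k in range(len(result)):
--                 if j < len(result[k]):
--                     result[k].pop(j)
--     return result
-- ===== Notes on version B (the rewrite author's own statement) =====
-- stated objective: alternative
-- what changed: Replaces A's position-collecting double index loop plus index-range rebuild comprehensions by a column-major scan (for each column index, test whether any row holds the value there) and in-place back-to-front deletion: rows are copied once, then each bad column is popped from every surviving row in descending index order.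
import Mathlib
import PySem

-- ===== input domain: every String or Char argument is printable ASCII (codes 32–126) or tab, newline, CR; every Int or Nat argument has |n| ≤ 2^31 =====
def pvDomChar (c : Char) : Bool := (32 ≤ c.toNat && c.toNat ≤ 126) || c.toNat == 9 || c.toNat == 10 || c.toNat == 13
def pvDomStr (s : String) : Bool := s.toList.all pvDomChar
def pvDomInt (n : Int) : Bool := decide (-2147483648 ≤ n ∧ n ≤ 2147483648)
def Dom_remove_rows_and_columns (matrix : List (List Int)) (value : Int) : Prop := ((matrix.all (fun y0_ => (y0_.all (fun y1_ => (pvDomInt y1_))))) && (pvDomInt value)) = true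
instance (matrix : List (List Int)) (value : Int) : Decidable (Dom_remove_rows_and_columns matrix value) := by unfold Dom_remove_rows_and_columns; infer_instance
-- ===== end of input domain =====

-- B replaces A's position-collecting double index loop by a column-major bad-column scan with back-to-front pops of its own row copies (alternative decomposition; equal return values).


-- ===== PORT A =====
def remove_rows_and_columns (matrix : List (List Int)) (value : Int) : List (List Int) :=
  let st :=
    (PySem.List.pyRange 0 (matrix.length : Int) 1).foldl (fun st i =>
      (PySem.List.pyRange 0 ((PySem.List.pyGetD matrix i []).length : Int) 1).foldl
        (fun st2 j =>
          if PySem.List.pyGetD (PySem.List.pyGetD matrix i []) j 0 = value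
          then (st2.1 ++ [i], st2.2 ++ [j]) else st2) st) ([], [])
  let rows_to_delete := st.1
  let columns_to_delete := st.2
  ((PySem.List.pyRange 0 (matrix.length : Int) 1).filter
      (fun i => !(rows_to_delete.contains i))).map
    (fun i =>
      ((PySem.List.pyRange 0 ((PySem.List.pyGetD matrix i []).length : Int) 1).filter
          (fun j => !(columns_to_delete.contains j))).map
        (fun j => PySem.List.pyGetD (PySem.List.pyGetD matrix i []) j 0))

-- ===== PORT B =====
-- list(row) is an identity copy on immutable lists; result[k].pop(j) at 0 ≤ j < len(result[k]) is
-- eraseIdx j (every j the loop visits is nonnegative: range(width-1, -1, -1)).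
def remove_rows_and_columns_alt (matrix : List (List Int)) (value : Int) : List (List Int) :=
  let width := matrix.foldl (fun w row => if (row.length : Int) > w then (row.length : Int) else w) 0
  let result := matrix.filter (fun row => !(row.contains value))
  (PySem.List.pyRange (width - 1) (-1) (-1)).foldl
    (fun res j =>
      if matrix.any (fun row => decide (j < (row.length : Int)) && (PySem.List.pyGetD row j 0 == value))
      then res.map (fun r => if j < (r.length : Int) then r.eraseIdx j.toNat else r)
      else res) result

-- ===== PRECONDITION & SPEC =====
def Spec_remove_rows_and_columns (matrix : List (List Int)) (value : Int) (out : List (List Int)) : Prop := out = remove_rows_and_columns_alt matrix value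
instance (matrix : List (List Int)) (value : Int) (out : List (List Int)) : Decidable (Spec_remove_rows_and_columns matrix value out) := by unfold Spec_remove_rows_and_columns; infer_instance

-- ===== CLAIM (what is proved, stated in full; the proofs are below) =====
def Claim_equal_remove_rows_and_columns : Prop := ∀ (matrix : List (List Int)) (value : Int), Dom_remove_rows_and_columns matrix value → Spec_remove_rows_and_columns matrix value (remove_rows_and_columns matrix value)

-- ===== LEMMAS AND PROOFS =====

-- positions (starting at s) of value in row, as A collects them
def pvPos (value : Int) (row : List Int) (s : Int) : List Int :=
  ((PySem.List.enumerate row s).filter (fun p => p.2 == value)).map (fun p => p.1)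

lemma pvPos_cons (value x : Int) (xs : List Int) (s : Int) :
    pvPos value (x :: xs) s =
      (if x == value then [s] else []) ++ pvPos value xs (s + 1) := by
  simp only [pvPos, PySem.List.enumerate_cons, List.filter_cons]
  by_cases h : x == value <;> simp [h]

-- the inner loop of A, as a fold over enumerate
lemma inner_fold_eq (value i : Int) :
    ∀ (row : List Int) (s : Int) (st : List Int × List Int),
      (PySem.List.enumerate row s).foldl
        (fun st2 p => if p.2 = value then (st2.1 ++ [i], st2.2 ++ [p.1]) else st2) st
      = (st.1 ++ List.replicate (row.count value) i, st.2 ++ pvPos value row s) := by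
  intro row
  induction row with
  | nil => intro s st; simp [pvPos]
  | cons x xs ih =>
    intro s st
    simp only [PySem.List.enumerate_cons, List.foldl_cons, pvPos_cons]
    by_cases h : x = value
    · simp only [h, ih]
      simp only [List.count_cons, beq_self_eq_true, List.append_assoc,
        List.singleton_append, ite_true]
      simp [List.replicate_succ]
    · rw [if_neg h, ih]
      simp [h, beq_iff_eq]

-- the whole double loop of A
def outerG (value : Int) : (List Int × List Int) → Int × List Int → (List Int × List Int) :=
  fun st p => (st.1 ++ List.replicate (p.2.count value) p.1, st.2 ++ pvPos value p.2 0)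

lemma outer_fold_G (value : Int) :
    ∀ (l : List (Int × List Int)) (st : List Int × List Int),
      l.foldl (outerG value) st =
        (st.1 ++ l.flatMap (fun p => List.replicate (p.2.count value) p.1),
         st.2 ++ l.flatMap (fun p => pvPos value p.2 0)) := by
  intro l
  induction l with
  | nil => intro st; simp
  | cons p l ih => intro st; simp [outerG, ih]

-- A's collected state, characterised
lemma collect_eq (matrix : List (List Int)) (value : Int) :
    (PySem.List.pyRange 0 (matrix.length : Int) 1).foldl (fun st i =>
      (PySem.List.pyRange 0 ((PySem.List.pyGetD matrix i []).length : Int) 1).foldl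
        (fun st2 j =>
          if PySem.List.pyGetD (PySem.List.pyGetD matrix i []) j 0 = value
          then (st2.1 ++ [i], st2.2 ++ [j]) else st2) st) (([], []) : List Int × List Int)
    = ((PySem.List.enumerate matrix 0).flatMap
         (fun p => List.replicate (p.2.count value) p.1),
       (PySem.List.enumerate matrix 0).flatMap (fun p => pvPos value p.2 0)) := by
  have h1 : ∀ (i : Int) (row : List Int) (st : List Int × List Int),
      (PySem.List.pyRange 0 (row.length : Int) 1).foldl
        (fun st2 j => if PySem.List.pyGetD row j 0 = value
          then (st2.1 ++ [i], st2.2 ++ [j]) else st2) st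
      = (st.1 ++ List.replicate (row.count value) i, st.2 ++ pvPos value row 0) := by
    intro i row st
    rw [← inner_fold_eq value i row 0 st, PySem.List.enumerate_eq_map_pyRange row 0,
      List.foldl_map]
    simp only [PySem.List.len_eq]
  have h2 : (fun (st : List Int × List Int) (i : Int) =>
      (PySem.List.pyRange 0 ((PySem.List.pyGetD matrix i []).length : Int) 1).foldl
        (fun st2 j =>
          if PySem.List.pyGetD (PySem.List.pyGetD matrix i []) j 0 = value
          then (st2.1 ++ [i], st2.2 ++ [j]) else st2) st)
      = fun st i => outerG value st (i, PySem.List.pyGetD matrix i []) := by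
    funext st i
    rw [h1 i (PySem.List.pyGetD matrix i []) st]
    rfl
  rw [h2, show (fun (st : List Int × List Int) (i : Int) =>
      outerG value st (i, PySem.List.pyGetD matrix i []))
    = fun st i => outerG value st ((fun j => (j, PySem.List.pyGetD matrix j [])) i) from rfl,
    ← List.foldl_map]
  simp only [← PySem.List.len_eq]
  rw [← PySem.List.enumerate_eq_map_pyRange matrix ([] : List Int), outer_fold_G]
  simp

-- row-deletion list: membership ↔ the row contains value
lemma mem_rows_iff (matrix : List (List Int)) (value : Int) (i : Int) :
    (i ∈ (PySem.List.enumerate matrix 0).flatMap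
        (fun p => List.replicate (p.2.count value) p.1))
    ↔ ∃ (k : Nat) (h : k < matrix.length), (i = (k : Int) ∧ value ∈ matrix[k]) := by
  simp only [List.mem_flatMap, PySem.List.mem_enumerate_iff, List.mem_replicate]
  constructor
  · rintro ⟨p, ⟨k, hk, rfl⟩, hcnt, rfl⟩
    exact ⟨k, hk, by simp, List.count_pos_iff.mp (Nat.pos_of_ne_zero hcnt)⟩
  · rintro ⟨k, hk, rfl, hv⟩
    exact ⟨((k : Int), matrix[k]), ⟨k, hk, by simp⟩, (List.count_pos_iff.mpr hv).ne', by simp⟩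

-- column-deletion list = the flat bad-position list
lemma cols_eq (matrix : List (List Int)) (value : Int) :
    (PySem.List.enumerate matrix 0).flatMap (fun p => pvPos value p.2 0)
    = matrix.flatMap (fun row => pvPos value row 0) := by
  conv_rhs => rw [← PySem.List.map_snd_enumerate matrix 0]
  rw [List.flatMap_map]

-- the inner comprehension of A: index-range form vs enumerate form
lemma inner_assemble (row colsL : List Int) :
    ((PySem.List.pyRange 0 (row.length : Int) 1).filter
        (fun j => !(colsL.contains j))).map (fun j => PySem.List.pyGetD row j 0)
    = ((PySem.List.enumerate row 0).filter
        (fun p => !(colsL.contains p.1))).map (fun p => p.2) := by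
  rw [PySem.List.enumerate_eq_map_pyRange row 0, List.filter_map, List.map_map]
  simp only [PySem.List.len_eq]
  rfl

-- B's outer fold maps the same per-row fold over every surviving row
lemma foldl_map_lift {α β : Type} (c : β → Bool) (f : β → α → α) :
    ∀ (js : List β) (l : List α),
      js.foldl (fun res j => if c j then res.map (f j) else res) l
      = l.map (fun r => js.foldl (fun r j => if c j then f j r else r) r) := by
  intro js
  induction js with
  | nil => intro l; simp
  | cons j js ih =>
    intro l
    simp only [List.foldl_cons]
    by_cases h : c j
    · simp only [h, if_true, ih, List.map_map]; rfl
    · simp [h, ih]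

-- B's outer fold, with B's concrete condition and pop
lemma lift_spec (matrix : List (List Int)) (value : Int) (js : List Int) (l : List (List Int)) :
    js.foldl (fun res j =>
      if matrix.any (fun row => decide (j < (row.length : Int)) && (PySem.List.pyGetD row j 0 == value))
      then res.map (fun r => if j < (r.length : Int) then r.eraseIdx j.toNat else r)
      else res) l
    = l.map (fun r => js.foldl (fun r j =>
        if matrix.any (fun row => decide (j < (row.length : Int)) && (PySem.List.pyGetD row j 0 == value))
        then (if j < (r.length : Int) then r.eraseIdx j.toNat else r) else r) r) :=
  foldl_map_lift _ _ js l

lemma keep_all (c : Int → Bool) (S : List Int) (x : Int) (h : x ∉ S) :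
    (!(c x && S.contains x)) = true := by
  simp [List.contains_eq_mem, h]

lemma filt_true (c : Int → Bool) (S : List Int) (xs : List Int) (s : Int)
    (h : ∀ p ∈ PySem.List.enumerate xs s, (!(c p.1 && S.contains p.1)) = true) :
    ((PySem.List.enumerate xs s).filter (fun p => !(c p.1 && S.contains p.1))).map (fun p : Int × Int => p.2) = xs := by
  rw [List.filter_eq_self.mpr h, PySem.List.map_snd_enumerate]

-- back-to-front conditional pops = keep exactly the positions whose index is not a selected one
lemma desc_fold (c : Int → Bool) :
    ∀ (js : List Int), js.Pairwise (fun a b => b < a) → (∀ j ∈ js, 0 ≤ j) →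
    ∀ (row : List Int),
      js.foldl (fun r j => if c j then (if j < (r.length : Int) then r.eraseIdx j.toNat else r) else r) row
      = ((PySem.List.enumerate row 0).filter (fun p => !(c p.1 && js.contains p.1))).map (fun p => p.2) := by
  intro js
  induction js with
  | nil =>
    intro _ _ row
    simp only [List.foldl_nil]
    rw [filt_true]
    intro p _; simp
  | cons j rest ih =>
    intro hpw hnn row
    obtain ⟨hd, hpw'⟩ := List.pairwise_cons.mp hpw
    have h0j : 0 ≤ j := hnn j (by simp)
    have hnn' : ∀ x ∈ rest, 0 ≤ x := fun x hx => hnn x (by simp [hx])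
    simp only [List.foldl_cons]
    rw [ih hpw' hnn']
    by_cases hc : c j = true
    · by_cases hlen : j < (row.length : Int)
      · -- pop really happens
        rw [if_pos hc, if_pos hlen]
        have ht : j.toNat < row.length := by omega
        have hjt : (j.toNat : Int) = j := Int.toNat_of_nonneg h0j
        rw [List.eraseIdx_eq_take_drop_succ]
        conv_rhs => rw [show row = row.take j.toNat ++ row[j.toNat] :: row.drop (j.toNat + 1) by
          rw [← List.drop_eq_getElem_cons ht, List.take_append_drop]]
        rw [PySem.List.enumerate_append, PySem.List.enumerate_append,
          List.filter_append, List.filter_append, List.map_append, List.map_append]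
        have hlt : (row.take j.toNat).length = j.toNat := List.length_take_of_le (Nat.le_of_lt ht)
        congr 1
        · -- the untouched prefix: positions < j, predicates agree
          congr 1
          apply List.filter_congr
          intro p hp
          rw [PySem.List.mem_enumerate_iff] at hp
          obtain ⟨k, hk, rfl⟩ := hp
          have hkj : ¬(((k : Nat) : Int) = j) := by rw [hlt] at hk; omega
          simp [hkj]
        · -- the suffix: everything survives both filters; the popped cell heads the RHS
          rw [hlt, PySem.List.enumerate_cons, List.filter_cons]
          have hhead : (!(c ((0:Int) + j.toNat) && (j :: rest).contains ((0:Int) + j.toNat))) = false := by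
            simp [hjt, hc]
          rw [hhead]
          simp only [Bool.false_eq_true, if_false]
          rw [filt_true, filt_true] <;>
          · intro p hp
            rw [PySem.List.mem_enumerate_iff] at hp
            obtain ⟨k, hk, rfl⟩ := hp
            apply keep_all
            first
            | (intro hm; have := hd _ hm; omega)
            | (intro hm
               rcases List.mem_cons.mp hm with h | h
               · omega
               · have := hd _ h; omega)
      · -- bad column but this row is too short: position j does not occur in it
        rw [if_pos hc, if_neg hlen]
        apply congrArg
        apply List.filter_congr
        intro p hp
        rw [PySem.List.mem_enumerate_iff] at hp
        obtain ⟨k, hk, rfl⟩ := hp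
        have hkj : ¬(((k : Nat) : Int) = j) := by
          have : ((k : Nat) : Int) < (row.length : Int) := by exact_mod_cast hk
          omega
        simp [hkj]
    · -- c j false: both sides keep position j
      rw [if_neg hc]
      apply congrArg
      apply List.filter_congr
      intro p _
      by_cases hpj : p.1 = j
      · have : c p.1 = false := by rw [hpj]; simpa using hc
        simp [this]
      · simp [hpj]

-- B's running width is an upper bound of every row length
lemma width_max (matrix : List (List Int)) :
    0 ≤ matrix.foldl (fun w row => if (row.length : Int) > w then (row.length : Int) else w) 0
    ∧ ∀ row ∈ matrix, (row.length : Int) ≤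
        matrix.foldl (fun w row => if (row.length : Int) > w then (row.length : Int) else w) 0 := by
  have hfun : (fun (w : Int) (row : List Int) => if (row.length : Int) > w then (row.length : Int) else w)
      = fun w row => max w ((row.length : Int)) := by
    funext w row; split_ifs with h <;> omega
  rw [hfun]
  exact PySem.List.le_foldl_max_int matrix (fun row => (row.length : Int)) 0

-- membership in A's flat column list
lemma mem_colsL (matrix : List (List Int)) (value x : Int) :
    x ∈ matrix.flatMap (fun row => pvPos value row 0)
    ↔ ∃ row ∈ matrix, ∃ (k : Nat), ∃ (_ : k < row.length), x = (k : Int) ∧ row[k] = value := by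
  simp only [List.mem_flatMap, pvPos, List.mem_map, List.mem_filter,
    PySem.List.mem_enumerate_iff, beq_iff_eq]
  constructor
  · rintro ⟨row, hrow, p, ⟨⟨k, hk, rfl⟩, hv⟩, rfl⟩
    exact ⟨row, hrow, k, hk, by simp, hv⟩
  · rintro ⟨row, hrow, k, hk, rfl, hv⟩
    exact ⟨row, hrow, ((0 : Int) + (k : Int), row[k]), ⟨⟨k, hk, rfl⟩, hv⟩, by simp⟩

-- A's column predicate = B's column predicate, on nonnegative positions
lemma pred_bridge (matrix : List (List Int)) (value : Int) (W : Int)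
    (hW : ∀ row ∈ matrix, (row.length : Int) ≤ W) (x : Int) (hx : 0 ≤ x) :
    (matrix.flatMap (fun row => pvPos value row 0)).contains x
    = ((matrix.any (fun row => decide (x < (row.length : Int)) && (PySem.List.pyGetD row x 0 == value)))
        && (PySem.List.pyRange (W - 1) (-1) (-1)).contains x) := by
  rw [Bool.eq_iff_iff]
  simp only [List.contains_eq_mem, decide_eq_true_eq, Bool.and_eq_true, List.any_eq_true,
    PySem.List.mem_pyRange_neg_one, mem_colsL, beq_iff_eq]
  constructor
  · rintro ⟨row, hrow, k, hk, rfl, hv⟩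
    refine ⟨⟨row, hrow, by exact_mod_cast hk, ?_⟩, by omega, ?_⟩
    · rw [PySem.List.pyGetD_natCast, List.getD_eq_getElem row 0 hk]
      exact hv
    · have h1 := hW row hrow
      have h2 : ((k : Nat) : Int) < (row.length : Int) := by exact_mod_cast hk
      omega
  · rintro ⟨⟨row, hrow, hlt, hv⟩, _, _⟩
    have hkn : x.toNat < row.length := by omega
    refine ⟨row, hrow, x.toNat, hkn, by omega, ?_⟩
    rw [show x = ((x.toNat : Nat) : Int) by omega, PySem.List.pyGetD_natCast,
      List.getD_eq_getElem row 0 hkn] at hv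
    exact hv

-- ===== VERDICT (by name: the statement is the Claim_ definition above) =====
theorem remove_rows_and_columns_spec : Claim_equal_remove_rows_and_columns := by
  intro matrix value _
  show remove_rows_and_columns matrix value = remove_rows_and_columns_alt matrix value
  obtain ⟨hW0, hWle⟩ := width_max matrix
  -- A reduced to: keep rows without value, keep positions outside the flat column list
  have hA : remove_rows_and_columns matrix value
      = (matrix.filter (fun row => !(row.contains value))).map
          (fun row => ((PySem.List.enumerate row 0).filter
              (fun p => !((matrix.flatMap (fun r => pvPos value r 0)).contains p.1))).map (fun p => p.2)) := by
    simp only [remove_rows_and_columns]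
    rw [collect_eq, cols_eq]
    generalize matrix.flatMap (fun r => pvPos value r 0) = colsL
    conv_rhs => rw [← PySem.List.map_pyGetD_pyRange_zero' matrix ([] : List Int)]
    rw [List.filter_map, List.map_map]
    have hfil : ∀ (i : Int), i ∈ PySem.List.pyRange 0 (matrix.length : Int) 1 →
        (!(((PySem.List.enumerate matrix 0).flatMap
            (fun p => List.replicate (p.2.count value) p.1)).contains i))
        = !((PySem.List.pyGetD matrix i []).contains value) := by
      intro i hi
      rw [PySem.List.mem_pyRange_one] at hi
      obtain ⟨h0, hN⟩ := hi
      lift i to ℕ using h0 with k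
      have hk : k < matrix.length := by exact_mod_cast hN
      have hget : PySem.List.pyGetD matrix ((k : Nat) : Int) [] = matrix[k] := by
        rw [PySem.List.pyGetD_natCast, List.getD_eq_getElem matrix [] hk]
      rw [hget]
      have hiff : ((k : Int) ∈ (PySem.List.enumerate matrix 0).flatMap
          (fun p => List.replicate (p.2.count value) p.1)) ↔ value ∈ matrix[k] := by
        rw [mem_rows_iff]
        constructor
        · rintro ⟨k', hk', heq, hv⟩
          have : k = k' := by exact_mod_cast heq
          subst this; exact hv
        · intro hv; exact ⟨k, hk, rfl, hv⟩
      rw [Bool.eq_iff_iff]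
      simp [hiff]
    rw [List.filter_congr hfil]
    apply List.map_congr_left
    intro i _
    exact inner_assemble (PySem.List.pyGetD matrix i []) _
  -- B reduced to the same shape with B's column predicate
  have hB : remove_rows_and_columns_alt matrix value
      = (matrix.filter (fun row => !(row.contains value))).map
          (fun row => ((PySem.List.enumerate row 0).filter
              (fun p => !((matrix.any (fun r => decide (p.1 < (r.length : Int)) && (PySem.List.pyGetD r p.1 0 == value)))
                  && (PySem.List.pyRange
                        (matrix.foldl (fun w row => if (row.length : Int) > w then (row.length : Int) else w) 0 - 1)
                        (-1) (-1)).contains p.1))).map (fun p => p.2)) := by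
    simp only [remove_rows_and_columns_alt]
    rw [lift_spec]
    apply List.map_congr_left
    intro row _
    have hpair : (PySem.List.pyRange
        (matrix.foldl (fun w row => if (row.length : Int) > w then (row.length : Int) else w) 0 - 1)
        (-1) (-1)).Pairwise (fun a b => b < a) := by
      rw [PySem.List.pyRange_neg_one_eq_reverse, List.pairwise_reverse]
      exact PySem.List.pairwise_lt_pyRange_one _ _
    have hnneg : ∀ j ∈ PySem.List.pyRange
        (matrix.foldl (fun w row => if (row.length : Int) > w then (row.length : Int) else w) 0 - 1)
        (-1) (-1), 0 ≤ j := by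
      intro j hj
      rw [PySem.List.mem_pyRange_neg_one] at hj
      omega
    exact desc_fold _ _ hpair hnneg row
  rw [hA, hB]
  apply List.map_congr_left
  intro row _
  apply congrArg
  apply List.filter_congr
  intro p hp
  rw [PySem.List.mem_enumerate_iff] at hp
  obtain ⟨k, hk, rfl⟩ := hp
  rw [pred_bridge matrix value _ hWle _ (by omega : (0:Int) ≤ 0 + (k : Int))]
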